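-- pv_equiv track=rewrite | github.com/Chopinsky/algo-problems | challenges/499/401+Binary+Watch.py | find
-- ===== SOURCE A (Python) =====
-- def find(i: int, rem: int, arr: list, limit: int):
--   n = len(arr)
--   if rem > n-i or i >= n:
--     return []
--
--   if rem == 0:
--     return [0]
--
--   if rem == 1:
--     return arr[i:]
--
--   # base case: not using current hr digit
--   ans = set(find(i+1, rem, arr, limit))
--
--   # extra case: use current hr digit
--   curr = arr[i]
--   for t in find(i+1, rem-1, arr, limit):
--     if curr+t >= limit:
--       break
--
--     ans.add(curr+t)
--
--   return sorted(ans)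
-- ===== SOURCE B (Python) =====
-- def find(i: int, rem: int, arr: list, limit: int):
--   # Bottom-up DP over (position, count) states: each state computed once.
--   n = len(arr)
--   if rem > n - i or i >= n or rem < 0:
--     return []
--   if rem == 0:
--     return [0]
--   if rem == 1:
--     return arr[i:]
--
--   prev = [[]] * (rem + 1)          # row for position n: every state is []
--   for j in range(n - 1, i - 1, -1):
--     row = [[0], arr[j:]]
--     for r in range(2, rem + 1):
--       s = set(prev[r])
--       c = arr[j]
--       for t in prev[r - 1]:
--         if c + t >= limit:
--           break
--         s.add(c + t)
--       row.append(sorted(s))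
--     prev = row
--   return prev[rem]
-- ===== Notes on version B (the rewrite author's own statement) =====
-- stated objective: alternative
-- what changed: Replaces A's top-down recursion (recomputing each (position,count) state many times) by a bottom-up dynamic-programming table of rows indexed by count, filled once per position.
import Mathlib
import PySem

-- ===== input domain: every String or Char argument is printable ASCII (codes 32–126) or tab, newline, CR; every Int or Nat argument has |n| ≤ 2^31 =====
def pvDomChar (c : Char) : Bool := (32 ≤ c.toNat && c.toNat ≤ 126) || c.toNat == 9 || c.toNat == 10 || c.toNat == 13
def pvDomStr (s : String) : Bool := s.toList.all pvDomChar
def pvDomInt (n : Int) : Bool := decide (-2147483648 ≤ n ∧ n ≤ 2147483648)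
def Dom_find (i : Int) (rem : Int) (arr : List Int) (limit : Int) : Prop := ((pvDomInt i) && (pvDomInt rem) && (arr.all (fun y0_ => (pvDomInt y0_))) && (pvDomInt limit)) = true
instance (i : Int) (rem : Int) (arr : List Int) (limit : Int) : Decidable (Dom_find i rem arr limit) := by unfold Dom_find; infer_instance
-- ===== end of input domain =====

-- B replaces A's top-down recursion by a bottom-up DP table over (position, count) states, computing each state once.


-- ===== PORT A =====
-- the 'for t in …: if curr+t >= limit: break; ans.add(curr+t)' loop (textually the same in Source A and Source B)
def addUntil (curr limit : Int) (s : PySem.Set Int) : List Int → PySem.Set Int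
  | [] => s
  | t :: ts => if curr + t ≥ limit then s else addUntil curr limit (PySem.Set.add s (curr + t)) ts

def find (i : Int) (rem : Int) (arr : List Int) (limit : Int) : List Int :=
  let n : Int := arr.length
  if h : rem > n - i ∨ i ≥ n then []
  else if rem = 0 then [0]
  else if rem = 1 then PySem.List.slice arr (some i) none
  else
    let ans := PySem.Set.ofList (find (i+1) rem arr limit)
    let curr := PySem.List.pyGetD arr i 0
    let ans2 := addUntil curr limit ans (find (i+1) (rem-1) arr limit)
    PySem.List.sorted ans2 (fun x => x) false
termination_by ((arr.length : Int) - i).toNat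
decreasing_by all_goals (simp only [not_or, not_lt, not_le] at h; omega)

-- ===== PORT B =====
def find_alt (i : Int) (rem : Int) (arr : List Int) (limit : Int) : List Int :=
  let n : Int := arr.length
  if rem > n - i ∨ i ≥ n ∨ rem < 0 then []
  else if rem = 0 then [0]
  else if rem = 1 then PySem.List.slice arr (some i) none
  else
    let prev0 : List (List Int) := List.replicate (rem + 1).toNat []
    let prev := (PySem.List.pyRange (n-1) (i-1) (-1)).foldl (fun prev j =>
        (PySem.List.pyRange 2 (rem+1) 1).foldl (fun row r =>
            let s := PySem.Set.ofList (PySem.List.pyGetD prev r [])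
            let c := PySem.List.pyGetD arr j 0
            let s2 := addUntil c limit s (PySem.List.pyGetD prev (r-1) [])
            row ++ [PySem.List.sorted s2 (fun x => x) false])
          [[0], PySem.List.slice arr (some j) none]) prev0
    PySem.List.pyGetD prev rem []

-- ===== PRECONDITION & SPEC =====
-- Pre_ excludes only inputs where the Python A raises: start index i < -len(arr) with rem ∉ {0,1} and
-- rem ≤ len(arr) - i (there A evaluates arr[i]: IndexError, or RecursionError for very negative i).
def Pre_find (i : Int) (rem : Int) (arr : List Int) (limit : Int) : Prop :=
  -(arr.length : Int) ≤ i ∨ rem = 0 ∨ rem = 1 ∨ (arr.length : Int) - i < rem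
instance (i : Int) (rem : Int) (arr : List Int) (limit : Int) : Decidable (Pre_find i rem arr limit) := by unfold Pre_find; infer_instance
def pvWitness_find : Int × Int × List Int × Int := (0, 2, [1, 2, 3], 10)

def Spec_find (i : Int) (rem : Int) (arr : List Int) (limit : Int) (out : List Int) : Prop := out = find_alt i rem arr limit
instance (i : Int) (rem : Int) (arr : List Int) (limit : Int) (out : List Int) : Decidable (Spec_find i rem arr limit out) := by unfold Spec_find; infer_instance

-- ===== CLAIM (what is proved, stated in full; the proofs are below) =====
def Claim_equal_find : Prop := ∀ (i : Int) (rem : Int) (arr : List Int) (limit : Int), Dom_find i rem arr limit → Pre_find i rem arr limit → Spec_find i rem arr limit (find i rem arr limit)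

-- ===== LEMMAS AND PROOFS =====

-- the DP table of A-states at position j: entry r is find j r
def pvTable (rem : Int) (arr : List Int) (limit : Int) (j : Int) : List (List Int) :=
  (PySem.List.pyRange 0 (rem+1) 1).map (fun r => find j r arr limit)

-- find j r = [] whenever r > n - j or j ≥ n (the first check)
theorem find_empty (j r : Int) (arr : List Int) (limit : Int)
    (h : r > (arr.length : Int) - j ∨ j ≥ (arr.length : Int)) :
    find j r arr limit = [] := by
  unfold find; simp only []; rw [dif_pos h]

-- find j r = [] for negative r (every state below only combines empty states)
theorem find_neg (j r : Int) (arr : List Int) (limit : Int) (hr : r < 0) :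
    find j r arr limit = [] := by
  by_cases h : r > (arr.length : Int) - j ∨ j ≥ (arr.length : Int)
  · exact find_empty j r arr limit h
  · rw [find, dif_neg h, if_neg (by omega : ¬ r = 0), if_neg (by omega : ¬ r = 1)]
    rw [find_neg (j+1) r arr limit hr, find_neg (j+1) (r-1) arr limit (by omega)]
    rfl
termination_by ((arr.length : Int) - j).toNat
decreasing_by all_goals (simp only [not_or, not_lt, not_le] at h; omega)

-- the combine step: for 2 ≤ r and j < n, find j r is the sorted merge of the two states at j+1
theorem find_combine (j r : Int) (arr : List Int) (limit : Int)
    (hj : j < (arr.length : Int)) (hr : 2 ≤ r) :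
    find j r arr limit =
      PySem.List.sorted
        (addUntil (PySem.List.pyGetD arr j 0) limit
          (PySem.Set.ofList (find (j+1) r arr limit))
          (find (j+1) (r-1) arr limit)) (fun x => x) false := by
  by_cases hbig : r > (arr.length : Int) - j
  · rw [find_empty j r arr limit (Or.inl hbig),
        find_empty (j+1) r arr limit (Or.inl (by omega)),
        find_empty (j+1) (r-1) arr limit (Or.inl (by omega))]
    rfl
  · rw [find, dif_neg (by simp only [not_or, not_lt, not_le]; omega),
        if_neg (by omega : ¬ r = 0), if_neg (by omega : ¬ r = 1)]

theorem flatMap_single {α β : Type} (f : α → β) (l : List α) :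
    l.flatMap (fun x => [f x]) = l.map f := by
  induction l with
  | nil => rfl
  | cons a l ih => simp [List.flatMap_cons, ih]

theorem pyRange_neg_one_snoc (a b : Int) (h : b ≤ a) :
    PySem.List.pyRange a (b-1) (-1) = PySem.List.pyRange a b (-1) ++ [b] := by
  rw [PySem.List.pyRange_neg_one_eq_reverse, PySem.List.pyRange_neg_one_eq_reverse]
  rw [(by ring : b - 1 + 1 = b), PySem.List.pyRange_one_cons (by omega : b < a + 1)]
  simp

-- one outer-loop iteration turns the table at j+1 into the table at j
theorem step_eq (rem : Int) (arr : List Int) (limit : Int) (j : Int)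
    (hrem : 2 ≤ rem) (hj : j < (arr.length : Int)) :
    ((PySem.List.pyRange 2 (rem+1) 1).foldl (fun row r =>
        row ++ [PySem.List.sorted
          (addUntil (PySem.List.pyGetD arr j 0) limit
            (PySem.Set.ofList (PySem.List.pyGetD (pvTable rem arr limit (j+1)) r []))
            (PySem.List.pyGetD (pvTable rem arr limit (j+1)) (r-1) [])) (fun x => x) false])
      [[0], PySem.List.slice arr (some j) none])
    = pvTable rem arr limit j := by
  rw [PySem.List.foldl_append_eq_flatMap
        (fun r => [PySem.List.sorted
          (addUntil (PySem.List.pyGetD arr j 0) limit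
            (PySem.Set.ofList (PySem.List.pyGetD (pvTable rem arr limit (j+1)) r []))
            (PySem.List.pyGetD (pvTable rem arr limit (j+1)) (r-1) [])) (fun x => x) false])]
  rw [flatMap_single]
  have hmap : ∀ r ∈ PySem.List.pyRange 2 (rem+1) 1,
      PySem.List.sorted
        (addUntil (PySem.List.pyGetD arr j 0) limit
          (PySem.Set.ofList (PySem.List.pyGetD (pvTable rem arr limit (j+1)) r []))
          (PySem.List.pyGetD (pvTable rem arr limit (j+1)) (r-1) [])) (fun x => x) false
      = find j r arr limit := by
    intro r hrmem
    rw [PySem.List.mem_pyRange_one] at hrmem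
    unfold pvTable
    rw [PySem.List.pyGetD_map_pyRange_of_nonneg _ _ _ _ (by omega) (by omega),
        PySem.List.pyGetD_map_pyRange_of_nonneg _ _ _ _ (by omega) (by omega)]
    exact (find_combine j r arr limit hj (by omega)).symm
  rw [List.map_congr_left hmap]
  unfold pvTable
  rw [PySem.List.pyRange_one_cons (by omega : (0:Int) < rem+1),
      PySem.List.pyRange_one_cons (by omega : (0:Int)+1 < rem+1)]
  simp only [List.map_cons]
  have h0 : find j 0 arr limit = [0] := by
    rw [find, dif_neg (by simp only [not_or, not_lt, not_le]; omega), if_pos rfl]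
  have h1 : find j (0+1) arr limit = PySem.List.slice arr (some j) none := by
    rw [find, dif_neg (by simp only [not_or, not_lt, not_le]; omega),
        if_neg (by omega : ¬ (0:Int)+1 = 0), if_pos (by norm_num : ((0:Int)+1 = 1))]
  rw [h0, h1]
  norm_num

-- the outer loop, run from position n-1 down to j, produces the table at j
theorem loop_inv (rem : Int) (arr : List Int) (limit : Int) (hrem : 2 ≤ rem)
    (j : Int) (hj : j ≤ (arr.length : Int)) :
    ((PySem.List.pyRange ((arr.length : Int)-1) (j-1) (-1)).foldl (fun prev j =>
        (PySem.List.pyRange 2 (rem+1) 1).foldl (fun row r =>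
            row ++ [PySem.List.sorted
              (addUntil (PySem.List.pyGetD arr j 0) limit
                (PySem.Set.ofList (PySem.List.pyGetD prev r []))
                (PySem.List.pyGetD prev (r-1) [])) (fun x => x) false])
          [[0], PySem.List.slice arr (some j) none])
      (List.replicate (rem + 1).toNat []))
    = pvTable rem arr limit j := by
  by_cases hjn : j = (arr.length : Int)
  · subst hjn
    rw [PySem.List.pyRange_neg_one_eq_nil (by omega)]
    simp only [List.foldl_nil]
    unfold pvTable
    symm
    rw [List.eq_replicate_iff]
    constructor
    · rw [List.length_map, PySem.List.length_pyRange_one]; norm_num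
    · intro b hb
      simp only [List.mem_map] at hb
      obtain ⟨r, _, hr⟩ := hb
      rw [← hr, find_empty _ r arr limit (Or.inr (by omega))]
  · have hjlt : j < (arr.length : Int) := by omega
    rw [pyRange_neg_one_snoc _ _ (by omega), List.foldl_append]
    have ih := loop_inv rem arr limit hrem (j+1) (by omega)
    rw [(by ring : j + 1 - 1 = j)] at ih
    rw [ih]
    simp only [List.foldl_cons, List.foldl_nil]
    exact step_eq rem arr limit j hrem hjlt
termination_by ((arr.length : Int) - j).toNat
decreasing_by omega

-- ===== VERDICT (by name: the statement is the Claim_ definition above) =====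
theorem find_spec : Claim_equal_find := by
  intro i rem arr limit _ _
  unfold Spec_find
  by_cases hA : rem > (arr.length : Int) - i ∨ i ≥ (arr.length : Int)
  · rw [find_empty i rem arr limit hA, find_alt]
    rw [if_pos (by tauto)]
  · have hA' : rem ≤ (arr.length : Int) - i ∧ i < (arr.length : Int) := by
      simp only [not_or, not_lt, not_le] at hA; omega
    by_cases h0 : rem = 0
    · subst h0
      rw [find, dif_neg hA, if_pos rfl, find_alt,
          if_neg (by simp only [not_or, not_lt, not_le]; omega), if_pos rfl]
    · by_cases h1 : rem = 1
      · subst h1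
        rw [find, dif_neg hA, if_neg (by norm_num), if_pos rfl, find_alt,
            if_neg (by simp only [not_or, not_lt, not_le]; omega),
            if_neg (by norm_num), if_pos rfl]
      · by_cases hneg : rem < 0
        · rw [find_neg i rem arr limit hneg, find_alt,
              if_pos (Or.inr (Or.inr hneg))]
        · have hrem : 2 ≤ rem := by omega
          rw [find_alt, if_neg (by simp only [not_or, not_lt, not_le]; omega),
              if_neg h0, if_neg h1]
          show find i rem arr limit = PySem.List.pyGetD
            ((PySem.List.pyRange ((arr.length : Int)-1) (i-1) (-1)).foldl (fun prev j =>
                (PySem.List.pyRange 2 (rem+1) 1).foldl (fun row r =>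
                    row ++ [PySem.List.sorted
                      (addUntil (PySem.List.pyGetD arr j 0) limit
                        (PySem.Set.ofList (PySem.List.pyGetD prev r []))
                        (PySem.List.pyGetD prev (r-1) [])) (fun x => x) false])
                  [[0], PySem.List.slice arr (some j) none])
              (List.replicate (rem + 1).toNat [])) rem []
          rw [loop_inv rem arr limit hrem i (by omega)]
          unfold pvTable
          rw [PySem.List.pyGetD_map_pyRange_of_nonneg _ _ _ _ (by omega) (by omega)]
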